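-- pv_equiv track=rewrite | github.com/wherby/code | algorithm/dfs/OOM/subtree-inversion-sum/dp递推.py | subtreeInversionSum
-- ===== SOURCE A (Python) =====
-- from typing import List, Tuple, Optional
--
-- max = lambda a, b: b if b > a else a  # 手写 max 效率更高
--
-- def subtreeInversionSum(edges: List[List[int]], nums: List[int], k: int) -> int:
--     n = len(nums)
--     g = [[] for _ in range(n)]
--     for x, y in edges:
--         g[x].append(y)
--         g[y].append(x)
--
--     def dfs(x: int, fa: int) -> List[List[int]]:
--         v = nums[x]
--         res = [[v, -v] for _ in range(k)]
--         s0, s1 = -v, v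
--         for y in g[x]:
--             if y == fa:
--                 continue
--             fy = dfs(y, x)
--             # 不反转
--             for cd in range(k):
--                 res[cd][0] += fy[max(cd - 1, 0)][0]
--                 res[cd][1] += fy[max(cd - 1, 0)][1]
--             # 反转
--             s0 += fy[k - 1][1]
--             s1 += fy[k - 1][0]
--         # 反转
--         res[0][0] = max(res[0][0], s0)
--         res[0][1] = max(res[0][1], s1)
--         return res
--
--     return dfs(0, -1)[0][0]
-- ===== SOURCE B (Python) =====
-- from typing import List
--
-- def subtreeInversionSum(edges: List[List[int]], nums: List[int], k: int) -> int:
--     n = len(nums)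
--     adj = [[] for _ in range(n)]
--     for x, y in edges:
--         adj[x].append(y)
--         adj[y].append(x)
--
--     # pass 1: iterative DFS with an explicit stack, recording (node, parent) visit order
--     order = []
--     stack = [(0, -1)]
--     while stack:
--         x, fa = stack.pop()
--         order.append((x, fa))
--         for y in adj[x]:
--             if y != fa:
--                 stack.append((y, x))
--
--     # pass 2: children appear after their parent in `order`, so filling the table in
--     # reverse visit order sees every child's table before its parent's
--     dp = [None] * n
--     for x, fa in reversed(order):
--         v = nums[x]
--         kids = [dp[y] for y in adj[x] if y != fa]
--         res = [(v + sum(f[max(cd - 1, 0)][0] for f in kids),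
--                 -v + sum(f[max(cd - 1, 0)][1] for f in kids))
--                for cd in range(k)]
--         s0 = -v + sum(f[k - 1][1] for f in kids)
--         s1 = v + sum(f[k - 1][0] for f in kids)
--         res[0] = (max(res[0][0], s0), max(res[0][1], s1))
--         dp[x] = res
--     return dp[0][0][0]
-- ===== Notes on version B (the rewrite author's own statement) =====
-- stated objective: alternative
-- what changed: A computes the tree DP by direct recursion with per-child in-place accumulation into each res row; B is iterative: an explicit-stack pass collects the (node, parent) visit order, then a reverse-order pass fills a dp array, building each node's k-row table by a per-cooldown comprehension that sums over the already-finished child tables instead of mutating rows child by child.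
-- outside the precondition, e.g. on subtreeInversionSum([[0, 1], [1, 0]], [5, 2], 1): A returns 9, B returns 9; on subtreeInversionSum([[0, 0]], [5], 1): A returns 15, B returns 15; on subtreeInversionSum([[-1, -1]], [0], 1): A returns 0, B returns 0
import Mathlib
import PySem

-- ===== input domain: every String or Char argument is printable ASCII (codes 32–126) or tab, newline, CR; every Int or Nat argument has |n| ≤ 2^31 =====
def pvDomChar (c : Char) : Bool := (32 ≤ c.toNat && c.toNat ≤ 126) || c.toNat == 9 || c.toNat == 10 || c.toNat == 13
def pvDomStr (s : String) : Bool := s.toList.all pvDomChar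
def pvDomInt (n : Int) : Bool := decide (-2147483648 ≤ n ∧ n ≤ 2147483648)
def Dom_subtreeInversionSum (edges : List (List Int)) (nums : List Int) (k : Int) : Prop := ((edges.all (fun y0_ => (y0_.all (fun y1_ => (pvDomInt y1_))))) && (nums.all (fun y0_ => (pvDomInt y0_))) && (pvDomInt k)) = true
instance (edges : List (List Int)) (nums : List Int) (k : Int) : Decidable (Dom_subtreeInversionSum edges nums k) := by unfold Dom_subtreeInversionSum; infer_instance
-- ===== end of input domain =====

-- B replaces A's recursive tree DP (per-child in-place row updates) by an iterative
-- explicit-stack two-pass traversal whose per-node k-row table is built by per-cooldown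
-- sums over the already-finished child tables; same return value on the inputs admitted
-- by Pre_ (objective: alternative decomposition, not claimed faster).

-- ===== PORT A =====
-- A's hand-written `max = lambda a, b: b if b > a else a`
def pymax (a b : Int) : Int := if b > a then b else a

-- Python list indexing on index i of a list of length len: negative i wraps; exact for
-- -len ≤ i < len, which Pre_ guarantees for every index the programs use
def pvWrap (len : Nat) (i : Int) : Nat := (if i < 0 then i + len else i).toNat

-- `g[x]` (row read with Python's wraparound)
def pvRow (g : List (List Int)) (x : Int) : List Int := g.getD (pvWrap g.length x) []

-- `g[i].append(v)`
def pvAppend (g : List (List Int)) (i v : Int) : List (List Int) :=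
  g.modify (pvWrap g.length i) (fun l => l ++ [v])

-- `g = [[] for _ in range(n)]; for x, y in edges: g[x].append(y); g[y].append(x)`
def pvBuildG (edges : List (List Int)) (n : Nat) : List (List Int) :=
  edges.foldl (fun g e =>
    match e with
    | [x, y] => pvAppend (pvAppend g x y) y x
    | _ => g) (List.replicate n [])

-- the body of A's dfs at one node: res/s0/s1 accumulated child by child over g[x], then the
-- final cooldown-0 maximum; `fy` is the recursive call; a Python row `[p, m]` is the pair `(p, m)`
def pvNode (nums : List Int) (k : Int) (gx : List Int) (x fa : Int)
    (fy : Int → List (Int × Int)) : List (Int × Int) :=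
  let v := nums.getD (pvWrap nums.length x) 0
  let st := gx.foldl (fun (st : List (Int × Int) × Int × Int) y =>
    if y = fa then st
    else
      let f := fy y
      let res := (List.range k.toNat).foldl (fun r cd =>
          let p := f.getD (cd - 1) (0, 0)
          r.set cd ((r.getD cd (0, 0)).1 + p.1, (r.getD cd (0, 0)).2 + p.2)) st.1
      (res, st.2.1 + (f.getD (k.toNat - 1) (0, 0)).2,
            st.2.2 + (f.getD (k.toNat - 1) (0, 0)).1))
    (List.replicate k.toNat (v, -v), (-v, v))
  st.1.set 0 (pymax (st.1.getD 0 (0, 0)).1 st.2.1, pymax (st.1.getD 0 (0, 0)).2 st.2.2)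

-- A's recursive `dfs(x, fa)`; the fuel n bounds the recursion depth, which on the inputs
-- admitted by Pre_ is never exhausted
def pvDfsA (g : List (List Int)) (nums : List Int) (k : Int) : Nat → Int → Int → List (Int × Int)
  | 0, _, _ => []
  | f + 1, x, fa => pvNode nums k (pvRow g x) x fa (fun y => pvDfsA g nums k f y x)

def subtreeInversionSum (edges : List (List Int)) (nums : List Int) (k : Int) : Int :=
  let n := nums.length
  let g := pvBuildG edges n
  ((pvDfsA g nums k n 0 (-1)).getD 0 (0, 0)).1

-- ===== PORT B =====
-- Source B's Python indexing (same wraparound rule), its row read and `adj[i].append(v)`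
def bWrap (len : Nat) (i : Int) : Nat := (if i < 0 then i + len else i).toNat
def bRow (adj : List (List Int)) (x : Int) : List Int := adj.getD (bWrap adj.length x) []
def bAppend (adj : List (List Int)) (i v : Int) : List (List Int) :=
  adj.modify (bWrap adj.length i) (fun l => l ++ [v])

-- Source B's adjacency build loop
def bAdj (edges : List (List Int)) (n : Nat) : List (List Int) :=
  edges.foldl (fun adj e =>
    match e with
    | [x, y] => bAppend (bAppend adj x y) y x
    | _ => adj) (List.replicate n [])

-- pass 1: `while stack: x, fa = stack.pop(); order.append(..); push children`; the stack is a
-- Lean list with its head as the Python list's end (top); fuel n = number of pops on a tree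
def bWalk (adj : List (List Int)) : Nat → List (Int × Int) → List (Int × Int) → List (Int × Int)
  | 0, _, acc => acc
  | _ + 1, [], acc => acc
  | f + 1, (x, fa) :: st, acc =>
      bWalk adj f ((((bRow adj x).filter (fun y => y ≠ fa)).map (fun y => (y, x))).reverse ++ st)
        (acc ++ [(x, fa)])

-- Source B's node table: the res comprehension (one entry per cooldown, each a sum over the
-- finished child tables `kids`), then s0/s1 and the cooldown-0 maximum; Nat subtraction
-- `cd - 1` is Python's `max(cd - 1, 0)`
def bNode (v : Int) (k : Int) (kids : List (List (Int × Int))) : List (Int × Int) :=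
  let res := (List.range k.toNat).map (fun cd =>
    (v + (kids.map (fun f => (f.getD (cd - 1) (0, 0)).1)).sum,
     -v + (kids.map (fun f => (f.getD (cd - 1) (0, 0)).2)).sum))
  let s0 := -v + (kids.map (fun f => (f.getD (k.toNat - 1) (0, 0)).2)).sum
  let s1 := v + (kids.map (fun f => (f.getD (k.toNat - 1) (0, 0)).1)).sum
  res.set 0 (max (res.getD 0 (0, 0)).1 s0, max (res.getD 0 (0, 0)).2 s1)

-- pass 2, one node of `for x, fa in reversed(order)`: kids = [dp[y] …]; dp[x] = bNode
def bStep (adj : List (List Int)) (nums : List Int) (k : Int)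
    (dp : List (Option (List (Int × Int)))) (e : Int × Int) : List (Option (List (Int × Int))) :=
  dp.set (bWrap dp.length e.1)
    (some (bNode (nums.getD (bWrap nums.length e.1) 0) k
      (((bRow adj e.1).filter (fun y => y ≠ e.2)).map
        (fun y => (dp.getD (bWrap dp.length y) none).getD []))))

def subtreeInversionSum_alt (edges : List (List Int)) (nums : List Int) (k : Int) : Int :=
  let n := nums.length
  let adj := bAdj edges n
  let order := bWalk adj n [(0, -1)] []
  let dp := order.reverse.foldl (bStep adj nums k) (List.replicate n none)
  (((dp.getD 0 none).getD []).getD 0 (0, 0)).1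

-- ===== PRECONDITION & SPEC =====
-- one closure step of reachability-from-0 along the edge list (raw names)
def pvGrow (edges : List (List Int)) (S : Finset Int) : Finset Int :=
  edges.foldl (fun T e =>
    match e with
    | [x, y] => if x ∈ T then insert y T
                else if y ∈ T then insert x T else T
    | _ => T) S

-- the names reachable from 0 (2·|edges|+1 closure steps suffice)
def pvCset (edges : List (List Int)) : Finset Int := (pvGrow edges)^[2 * edges.length + 1] {0}

-- all names the programs index with: 0 (the root) and every edge endpoint
def pvUsed (edges : List (List Int)) : List Int := 0 :: edges.flatMap (fun e => e)

-- Pre_ admits k ≥ 1, binary edges whose endpoints index nums in Python's range (negative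
-- wraparound included), a naming in which no endpoint value collides with the row of a
-- different name in node 0's component, and a connected component of node 0 that is a tree (as the problem
-- guarantees); edges outside that component are unconstrained.  Excluded while A still
-- returns are multigraphs/self-loops at node 0's component and wrap-ambiguous namings,
-- where A's value is an artefact of child revisits, and excluded as crashes are bad
-- indices, k ≤ 0, non-binary edges and cycles (IndexError/ValueError/RecursionError).
def Pre_subtreeInversionSum (edges : List (List Int)) (nums : List Int) (k : Int) : Prop :=
  1 ≤ nums.length ∧ 1 ≤ k ∧
  (∀ e ∈ edges, e.length = 2 ∧
      -(nums.length : Int) ≤ e.getD 0 0 ∧ (e.getD 0 0) < (nums.length : Int) ∧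
      -(nums.length : Int) ≤ e.getD 1 0 ∧ (e.getD 1 0) < (nums.length : Int)) ∧
  (∀ u ∈ pvUsed edges, ∀ v ∈ pvCset edges,
      pvWrap nums.length u = pvWrap nums.length v → u = v) ∧
  (edges.filter (fun e => (e.getD 0 0) ∈ pvCset edges)).length + 1 = (pvCset edges).card

instance (edges : List (List Int)) (nums : List Int) (k : Int) :
    Decidable (Pre_subtreeInversionSum edges nums k) := by
  unfold Pre_subtreeInversionSum; infer_instance

def pvWitness_subtreeInversionSum : List (List Int) × List Int × Int :=
  ([[0, 1], [2, 0]], [3, -2, 4], 2)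

def Spec_subtreeInversionSum (edges : List (List Int)) (nums : List Int) (k : Int) (out : Int) : Prop :=
  out = subtreeInversionSum_alt edges nums k
instance (edges : List (List Int)) (nums : List Int) (k : Int) (out : Int) :
    Decidable (Spec_subtreeInversionSum edges nums k out) := by
  unfold Spec_subtreeInversionSum; infer_instance

-- ===== CLAIM (what is proved, stated in full; the proofs are below) =====
def Claim_equal_subtreeInversionSum : Prop :=
  ∀ (edges : List (List Int)) (nums : List Int) (k : Int),
    Dom_subtreeInversionSum edges nums k → Pre_subtreeInversionSum edges nums k →
      Spec_subtreeInversionSum edges nums k (subtreeInversionSum edges nums k)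

-- ===== LEMMAS AND PROOFS =====

-- ---- bridging B's per-node sums to A's per-child accumulation ----

theorem pymax_eq_max (a b : Int) : pymax a b = max a b := by
  unfold pymax; rw [max_def]; split_ifs <;> omega

def pvS1 (kids : List (List (Int × Int))) (j : Nat) : Int :=
  (kids.map (fun f => (f.getD j (0, 0)).1)).sum
def pvS2 (kids : List (List (Int × Int))) (j : Nat) : Int :=
  (kids.map (fun f => (f.getD j (0, 0)).2)).sum

theorem pvS1_append (kids : List (List (Int × Int))) (f : List (Int × Int)) (j : Nat) :
    pvS1 (kids ++ [f]) j = pvS1 kids j + (f.getD j (0, 0)).1 := by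
  unfold pvS1; rw [List.map_append, List.sum_append]; simp
theorem pvS2_append (kids : List (List (Int × Int))) (f : List (Int × Int)) (j : Nat) :
    pvS2 (kids ++ [f]) j = pvS2 kids j + (f.getD j (0, 0)).2 := by
  unfold pvS2; rw [List.map_append, List.sum_append]; simp

-- the in-place range fold of A's inner loop acts pointwise on a range-indexed map
theorem setFold (K : Nat) (a b : Nat → Int) (h : Nat → Int × Int) :
    (List.range K).foldl (fun r cd =>
        r.set cd ((r.getD cd (0, 0)).1 + a cd, (r.getD cd (0, 0)).2 + b cd))
      ((List.range K).map h)
    = (List.range K).map (fun cd => ((h cd).1 + a cd, (h cd).2 + b cd)) := by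
  have main : ∀ m, m ≤ K →
      (List.range m).foldl (fun r cd =>
          r.set cd ((r.getD cd (0, 0)).1 + a cd, (r.getD cd (0, 0)).2 + b cd))
        ((List.range K).map h)
      = (List.range K).map (fun cd =>
          if cd < m then ((h cd).1 + a cd, (h cd).2 + b cd) else h cd) := by
    intro m
    induction m with
    | zero => intro _; simp
    | succ m ihm =>
      intro hm
      rw [List.range_succ, List.foldl_append, List.foldl_cons, List.foldl_nil, ihm (by omega)]
      set g := fun cd => if cd < m then ((h cd).1 + a cd, (h cd).2 + b cd) else h cd with hg
      have hget : ((List.range K).map g).getD m (0, 0) = g m := by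
        rw [List.getD_eq_getElem?_getD, List.getElem?_map, List.getElem?_range (by omega)]
        rfl
      have hgm : g m = h m := by rw [hg]; simp
      rw [hget, hgm]
      apply List.ext_getElem?
      intro i
      by_cases him : m = i
      · subst him
        rw [List.getElem?_set_self (by rw [List.length_map, List.length_range]; omega),
          List.getElem?_map, List.getElem?_range (by omega)]
        simp only [Option.map_some]
        congr 1
        rw [if_pos (by omega)]
      · rw [List.getElem?_set_ne (by omega), List.getElem?_map, List.getElem?_map]
        by_cases hik : i < K
        · rw [List.getElem?_range hik]
          simp only [Option.map_some]
          congr 1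
          simp only [hg]
          by_cases hilt : i < m
          · rw [if_pos hilt, if_pos (by omega)]
          · rw [if_neg hilt, if_neg (by omega)]
        · rw [List.getElem?_eq_none (by rw [List.length_range]; omega)]
          rfl
  rw [main K (le_refl K)]
  apply List.map_congr_left
  intro cd hcd
  rw [if_pos (List.mem_range.mp hcd)]

-- A's child fold computes exactly B's per-cooldown sums
theorem pvNode_fold (k : Int) (fa : Int) (fy : Int → List (Int × Int)) (v : Int)
    (gx : List Int) :
    gx.foldl (fun (st : List (Int × Int) × Int × Int) y =>
      if y = fa then st
      else
        ((List.range k.toNat).foldl (fun r cd =>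
            r.set cd ((r.getD cd (0, 0)).1 + ((fy y).getD (cd - 1) (0, 0)).1,
              (r.getD cd (0, 0)).2 + ((fy y).getD (cd - 1) (0, 0)).2)) st.1,
          st.2.1 + ((fy y).getD (k.toNat - 1) (0, 0)).2,
          st.2.2 + ((fy y).getD (k.toNat - 1) (0, 0)).1))
      (List.replicate k.toNat (v, -v), (-v, v))
    = ((List.range k.toNat).map (fun cd =>
          (v + pvS1 ((gx.filter (fun y => y ≠ fa)).map fy) (cd - 1),
           -v + pvS2 ((gx.filter (fun y => y ≠ fa)).map fy) (cd - 1))),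
       -v + pvS2 ((gx.filter (fun y => y ≠ fa)).map fy) (k.toNat - 1),
       v + pvS1 ((gx.filter (fun y => y ≠ fa)).map fy) (k.toNat - 1)) := by
  induction gx using List.reverseRecOn with
  | nil =>
    simp only [List.foldl_nil, List.filter_nil, List.map_nil, pvS1, pvS2, List.sum_nil,
      add_zero]
    have : (List.range k.toNat).map (fun _ => ((v : Int), -v))
        = List.replicate k.toNat (v, -v) := by
      rw [List.eq_replicate_iff]
      exact ⟨by simp, by intro p hp; obtain ⟨cd, _, rfl⟩ := List.mem_map.mp hp; rfl⟩
    rw [this]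
  | append_singleton l y ih =>
    rw [List.foldl_append, List.foldl_cons, List.foldl_nil, ih, List.filter_append]
    by_cases hfa : y = fa
    · rw [if_pos hfa]
      simp [hfa]
    · rw [if_neg hfa]
      have hfilt : List.filter (fun y => decide (y ≠ fa)) [y] = [y] := by
        simp [hfa]
      rw [hfilt, List.map_append, List.map_cons, List.map_nil]
      refine congrArg₂ Prod.mk ?_ (congrArg₂ Prod.mk ?_ ?_)
      · rw [setFold k.toNat (fun cd => ((fy y).getD (cd - 1) (0, 0)).1)
          (fun cd => ((fy y).getD (cd - 1) (0, 0)).2)]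
        apply List.map_congr_left
        intro cd _
        rw [pvS1_append, pvS2_append, add_assoc, add_assoc]
      · rw [pvS2_append, add_assoc]
      · rw [pvS1_append, add_assoc]

-- B's comprehension-built node table equals A's accumulated one
theorem bNode_eq (nums : List Int) (k : Int) (gx : List Int) (x fa : Int)
    (fy : Int → List (Int × Int)) :
    bNode (nums.getD (pvWrap nums.length x) 0) k ((gx.filter (fun y => y ≠ fa)).map fy)
      = pvNode nums k gx x fa fy := by
  unfold bNode pvNode
  simp only [pvNode_fold, pvS1, pvS2, pymax_eq_max]

theorem bWrap_eq : bWrap = pvWrap := rfl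
theorem bRow_eq : bRow = pvRow := rfl
theorem bAdj_eq : bAdj = pvBuildG := rfl

-- A's per-node body as B's pass-2 would use it, for the fold correspondence below
def pvStep (g : List (List Int)) (nums : List Int) (k : Int)
    (dp : List (Option (List (Int × Int)))) (e : Int × Int) : List (Option (List (Int × Int))) :=
  dp.set (pvWrap dp.length e.1)
    (some (pvNode nums k (pvRow g e.1) e.1 e.2
      (fun y => (dp.getD (pvWrap dp.length y) none).getD [])))

theorem bStep_eq (g : List (List Int)) (nums : List Int) (k : Int)
    (dp : List (Option (List (Int × Int)))) (e : Int × Int) :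
    bStep g nums k dp e = pvStep g nums k dp e := by
  unfold bStep pvStep
  rw [bWrap_eq, bRow_eq, bNode_eq]

-- ---- proof-side DFS definitions ----

-- in-range raw indices wrap below the length
theorem pvWrap_lt (n : Nat) (x : Int) (h1 : -(n : Int) ≤ x) (h2 : x < (n : Int)) :
    pvWrap n x < n := by
  unfold pvWrap; split <;> omega

-- the children A's dfs recurses into / B pushes, at node x with parent fa
def pvChl (g : List (List Int)) (x fa : Int) : List Int :=
  (pvRow g x).filter (fun y => y ≠ fa)

-- the DFS visit order, as a recursive reference; S is the set of not-yet-visited names on the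
-- current branch
def pvOrd (g : List (List Int)) (S : Finset Int) (x fa : Int) : List (Int × Int) :=
  if _h : x ∈ S then
    (x, fa) :: ((pvChl g x fa).reverse.flatMap (fun y => pvOrd g (S.erase x) y x))
  else []
termination_by S.card
decreasing_by exact Finset.card_erase_lt_of_mem ‹x ∈ S›

-- a well-behaved DFS source: the node's row index in range, not yet on the branch, children recursively so
inductive pvGood (g : List (List Int)) (n : Nat) : Finset Int → Int → Int → Prop
  | mk {S : Finset Int} {x fa : Int} :
      pvWrap n x < n → x ∈ S →
      (∀ y ∈ pvChl g x fa, pvGood g n (S.erase x) y x) →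
      pvGood g n S x fa

-- the row indices the DFS visits
def pvSpan (g : List (List Int)) (n : Nat) (S : Finset Int) (x fa : Int) : List Nat :=
  (pvOrd g S x fa).map (fun p => pvWrap n p.1)

-- ---- program lemmas ----

theorem pvNode_congr (nums : List Int) (k : Int) (gx : List Int) (x fa : Int)
    (f1 f2 : Int → List (Int × Int)) (h : ∀ y ∈ gx, y ≠ fa → f1 y = f2 y) :
    pvNode nums k gx x fa f1 = pvNode nums k gx x fa f2 := by
  unfold pvNode
  have : ∀ (l : List Int) (init : List (Int × Int) × Int × Int),
      (∀ y ∈ l, y ≠ fa → f1 y = f2 y) →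
      l.foldl (fun st y =>
        if y = fa then st
        else
          ((List.range k.toNat).foldl (fun r cd =>
              ((r.set cd ((r.getD cd (0, 0)).1 + ((f1 y).getD (cd - 1) (0, 0)).1,
                (r.getD cd (0, 0)).2 + ((f1 y).getD (cd - 1) (0, 0)).2)))) st.1,
            st.2.1 + ((f1 y).getD (k.toNat - 1) (0, 0)).2,
            st.2.2 + ((f1 y).getD (k.toNat - 1) (0, 0)).1)) init
      = l.foldl (fun st y =>
        if y = fa then st
        else
          ((List.range k.toNat).foldl (fun r cd =>
              ((r.set cd ((r.getD cd (0, 0)).1 + ((f2 y).getD (cd - 1) (0, 0)).1,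
                (r.getD cd (0, 0)).2 + ((f2 y).getD (cd - 1) (0, 0)).2)))) st.1,
            st.2.1 + ((f2 y).getD (k.toNat - 1) (0, 0)).2,
            st.2.2 + ((f2 y).getD (k.toNat - 1) (0, 0)).1)) init := by
    intro l
    induction l with
    | nil => intro init h'; rfl
    | cons a l ih =>
      intro init h'
      simp only [List.foldl_cons]
      by_cases ha : a = fa
      · rw [if_pos ha, if_pos ha]
        exact ih _ (fun y hy hne => h' y (List.mem_cons_of_mem _ hy) hne)
      · rw [if_neg ha, if_neg ha, h' a List.mem_cons_self ha]
        exact ih _ (fun y hy hne => h' y (List.mem_cons_of_mem _ hy) hne)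
  simp only [this gx _ h]

theorem pvDfsA_stable (g : List (List Int)) (nums : List Int) (k : Int) (n : Nat) :
    ∀ {S : Finset Int} {x fa : Int}, pvGood g n S x fa →
      ∀ {f f' : Nat}, S.card ≤ f → S.card ≤ f' →
        pvDfsA g nums k f x fa = pvDfsA g nums k f' x fa := by
  intro S x fa h
  induction h with
  | @mk S x fa h1 h2 h3 ih =>
    intro f f' hf hf'
    have hpos : 0 < S.card := Finset.card_pos.mpr ⟨_, h2⟩
    obtain ⟨a, rfl⟩ : ∃ a, f = a + 1 := ⟨f - 1, by omega⟩
    obtain ⟨b, rfl⟩ : ∃ b, f' = b + 1 := ⟨f' - 1, by omega⟩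
    have hcard : (S.erase x).card = S.card - 1 := Finset.card_erase_of_mem h2
    show pvNode nums k (pvRow g x) x fa _ = pvNode nums k (pvRow g x) x fa _
    apply pvNode_congr
    intro y hy hne
    have hmem : y ∈ pvChl g x fa := List.mem_filter.mpr ⟨hy, by simpa using hne⟩
    exact ih y hmem (by omega) (by omega)

theorem pvOrd_unfold {g : List (List Int)} {n : Nat} {S : Finset Int} {x fa : Int}
    (h : pvGood g n S x fa) :
    pvOrd g S x fa
      = (x, fa) :: ((pvChl g x fa).reverse.flatMap (fun y => pvOrd g (S.erase x) y x)) := by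
  cases h with | mk h1 h2 h3 => rw [pvOrd, dif_pos h2]

theorem bWalk_nilstack (g : List (List Int)) (f : Nat) (acc : List (Int × Int)) :
    bWalk g f [] acc = acc := by cases f <;> rfl

theorem bWalk_ord (g : List (List Int)) (n : Nat) :
    ∀ {S : Finset Int} {x fa : Int}, pvGood g n S x fa →
      ∀ (st acc : List (Int × Int)) (f : Nat),
        bWalk g ((pvOrd g S x fa).length + f) ((x, fa) :: st) acc
          = bWalk g f st (acc ++ pvOrd g S x fa) := by
  intro S x fa h
  induction h with
  | @mk S x fa h1 h2 h3 ih =>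
    intro st acc f
    have hord := pvOrd_unfold (pvGood.mk h1 h2 h3)
    have inner : ∀ (L : List Int), (∀ y ∈ L, y ∈ pvChl g x fa) →
        ∀ (st acc : List (Int × Int)) (f : Nat),
          bWalk g ((L.flatMap (fun y => pvOrd g (S.erase x) y x)).length + f)
              (L.map (fun y => (y, x)) ++ st) acc
            = bWalk g f st (acc ++ L.flatMap (fun y => pvOrd g (S.erase x) y x)) := by
      intro L
      induction L with
      | nil => intro _ st acc f; simp
      | cons y L' ihL =>
        intro hmem st acc f
        simp only [List.flatMap_cons, List.length_append, List.map_cons, List.cons_append]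
        rw [Nat.add_assoc, ih y (hmem y List.mem_cons_self)]
        rw [ihL (fun z hz => hmem z (List.mem_cons_of_mem _ hz))]
        rw [List.append_assoc]
    rw [hord]
    have hfuel : ((x, fa) :: (pvChl g x fa).reverse.flatMap
        (fun y => pvOrd g (S.erase x) y x)).length + f
      = ((pvChl g x fa).reverse.flatMap (fun y => pvOrd g (S.erase x) y x)).length + f + 1 := by
      simp [List.length_cons]; omega
    rw [hfuel]
    show bWalk g _ ((x, fa) :: st) acc = _
    rw [bWalk]
    have hpush : (((bRow g x).filter (fun y => y ≠ fa)).map (fun y => (y, x))).reverse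
        = ((pvChl g x fa).reverse).map (fun y => (y, x)) := by
      rw [bRow_eq, show (pvRow g x).filter (fun y => y ≠ fa) = pvChl g x fa from rfl,
        List.map_reverse]
    rw [hpush, inner ((pvChl g x fa).reverse) (fun y hy => List.mem_reverse.mp hy)]
    rw [List.append_assoc]
    rfl

theorem pvFold_ord (g : List (List Int)) (nums : List Int) (k : Int) (n : Nat) :
    ∀ {S : Finset Int} {x fa : Int}, pvGood g n S x fa → S.card ≤ n →
      (pvSpan g n S x fa).Nodup →
      ∀ dp : List (Option (List (Int × Int))), dp.length = n →
        ((pvOrd g S x fa).reverse.foldl (pvStep g nums k) dp).length = n ∧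
        (∀ i : Nat, i ∉ pvSpan g n S x fa →
          ((pvOrd g S x fa).reverse.foldl (pvStep g nums k) dp).getD i none = dp.getD i none) ∧
        (∀ p ∈ pvOrd g S x fa,
          ((pvOrd g S x fa).reverse.foldl (pvStep g nums k) dp).getD (pvWrap n p.1) none
            = some (pvDfsA g nums k n p.1 p.2)) := by
  intro S x fa h
  induction h with
  | @mk S x fa h1 h2 h3 ih =>
    intro hcard hnodup dp hdp
    have hord := pvOrd_unfold (pvGood.mk h1 h2 h3)
    have hcarde : (S.erase x).card = S.card - 1 := Finset.card_erase_of_mem h2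
    have hpos : 0 < S.card := Finset.card_pos.mpr ⟨_, h2⟩
    -- split the span Nodup
    have hspan : pvSpan g n S x fa
        = pvWrap n x :: ((pvChl g x fa).reverse.flatMap (fun y => pvSpan g n (S.erase x) y x)) := by
      rw [pvSpan, hord, List.map_cons, List.map_flatMap]; rfl
    rw [hspan] at hnodup
    have hxnot := (List.nodup_cons.mp hnodup).1
    have hnodup' := (List.nodup_cons.mp hnodup).2
    have hspanmem : ∀ (L : List Int) (T : Finset Int) (w : Int) (p : Int × Int),
        p ∈ L.flatMap (fun y => pvOrd g T y w) →
        pvWrap n p.1 ∈ L.flatMap (fun y => pvSpan g n T y w) := by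
      intro L T w p hp
      obtain ⟨z, hz, hpz⟩ := List.mem_flatMap.mp hp
      exact List.mem_flatMap.mpr ⟨z, hz, List.mem_map.mpr ⟨p, hpz, rfl⟩⟩
    -- the forest lemma
    have inner : ∀ (L : List Int), (∀ y ∈ L, y ∈ pvChl g x fa) →
        (L.flatMap (fun y => pvSpan g n (S.erase x) y x)).Nodup →
        ∀ dp : List (Option (List (Int × Int))), dp.length = n →
          ((L.flatMap (fun y => pvOrd g (S.erase x) y x)).reverse.foldl
              (pvStep g nums k) dp).length = n ∧
          (∀ i : Nat, i ∉ L.flatMap (fun y => pvSpan g n (S.erase x) y x) →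
            ((L.flatMap (fun y => pvOrd g (S.erase x) y x)).reverse.foldl
                (pvStep g nums k) dp).getD i none = dp.getD i none) ∧
          (∀ p ∈ L.flatMap (fun y => pvOrd g (S.erase x) y x),
            ((L.flatMap (fun y => pvOrd g (S.erase x) y x)).reverse.foldl
                (pvStep g nums k) dp).getD (pvWrap n p.1) none
              = some (pvDfsA g nums k n p.1 p.2)) := by
      intro L
      induction L with
      | nil => intro _ _ dp hdp; exact ⟨hdp, fun i _ => rfl, fun p hp => absurd hp (by simp)⟩
      | cons y L' ihL =>
        intro hmem hnd dp hdp
        simp only [List.flatMap_cons] at hnd ⊢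
        rw [List.nodup_append'] at hnd
        obtain ⟨hnd1, hnd2, hdisj⟩ := hnd
        simp only [List.reverse_append, List.foldl_append]
        obtain ⟨hl1, hf1, hv1⟩ :=
          ihL (fun z hz => hmem z (List.mem_cons_of_mem _ hz)) hnd2 dp hdp
        obtain ⟨hl2, hf2, hv2⟩ := ih y (hmem y List.mem_cons_self) (by omega) hnd1 _ hl1
        refine ⟨hl2, ?_, ?_⟩
        · intro i hi
          rw [hf2 i (fun hc => hi (List.mem_append.mpr (Or.inl hc))),
            hf1 i (fun hc => hi (List.mem_append.mpr (Or.inr hc)))]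
        · intro p hp
          rcases List.mem_append.mp hp with hp1 | hp2
          · exact hv2 p hp1
          · rw [hf2 (pvWrap n p.1) (fun hc => hdisj hc (hspanmem _ _ _ _ hp2))]
            exact hv1 p hp2
    obtain ⟨hl1, hf1, hv1⟩ := inner ((pvChl g x fa).reverse)
      (fun y hy => List.mem_reverse.mp hy) hnodup' dp hdp
    -- peel the final node step
    have hrev : (pvOrd g S x fa).reverse
        = ((pvChl g x fa).reverse.flatMap (fun y => pvOrd g (S.erase x) y x)).reverse
          ++ [(x, fa)] := by
      rw [hord, List.reverse_cons]
    have hfold : (pvOrd g S x fa).reverse.foldl (pvStep g nums k) dp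
        = pvStep g nums k
            (((pvChl g x fa).reverse.flatMap (fun y => pvOrd g (S.erase x) y x)).reverse.foldl
              (pvStep g nums k) dp) (x, fa) := by
      rw [hrev, List.foldl_append]; rfl
    set dp1 := ((pvChl g x fa).reverse.flatMap
      (fun y => pvOrd g (S.erase x) y x)).reverse.foldl (pvStep g nums k) dp with hdp1
    have hstep : pvStep g nums k dp1 (x, fa)
        = dp1.set (pvWrap n x) (some (pvNode nums k (pvRow g x) x fa
            (fun y => (dp1.getD (pvWrap n y) none).getD []))) := by
      unfold pvStep
      rw [hl1]
    have hn0 : 0 < n := by omega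
    obtain ⟨m, hm⟩ : ∃ m, n = m + 1 := ⟨n - 1, by omega⟩
    -- the node value equals A's dfs value
    have hnode : pvNode nums k (pvRow g x) x fa (fun y => (dp1.getD (pvWrap n y) none).getD [])
        = pvDfsA g nums k n x fa := by
      conv_rhs => rw [hm]
      show _ = pvNode nums k (pvRow g x) x fa (fun y => pvDfsA g nums k m y x)
      apply pvNode_congr
      intro y hy hne
      have hmem : y ∈ pvChl g x fa := List.mem_filter.mpr ⟨hy, by simpa using hne⟩
      have hymem : (y, x) ∈ (pvChl g x fa).reverse.flatMap
          (fun z => pvOrd g (S.erase x) z x) := by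
        refine List.mem_flatMap.mpr ⟨y, List.mem_reverse.mpr hmem, ?_⟩
        rw [pvOrd_unfold (h3 y hmem)]
        exact List.mem_cons_self
      rw [hv1 (y, x) hymem]
      exact Option.getD_some.trans
        (pvDfsA_stable g nums k n (h3 y hmem) (by omega) (by omega))
    refine ⟨?_, ?_, ?_⟩
    · rw [hfold, hstep, List.length_set]; exact hl1
    · intro i hi
      rw [hspan, List.mem_cons, not_or] at hi
      rw [hfold, hstep, List.getD_eq_getElem?_getD, List.getElem?_set_ne (by omega),
        ← List.getD_eq_getElem?_getD]
      exact hf1 i hi.2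
    · intro p hp
      rw [hord] at hp
      rcases List.mem_cons.mp hp with rfl | hp2
      · rw [hfold, hstep, List.getD_eq_getElem?_getD]
        rw [List.getElem?_set_self (by rw [hl1]; exact h1)]
        simp only [Option.getD_some]
        rw [hnode]
      · have hne : pvWrap n p.1 ≠ pvWrap n x := by
          intro hc
          have hmem2 := hspanmem _ _ _ _ hp2
          rw [hc] at hmem2
          exact hxnot hmem2
        rw [hfold, hstep, List.getD_eq_getElem?_getD, List.getElem?_set_ne (by omega),
          ← List.getD_eq_getElem?_getD]
        exact hv1 p hp2

-- ---- graph lemmas: Pre_ implies the DFS from 0 is good and visits each row once ----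

-- what one edge [a, b] contributes to the row at position xn (build-side, wrapped)
def pvContribW (n : Nat) (xn : Nat) (e : List Int) : List Int :=
  match e with
  | [a, b] => (if pvWrap n a = xn then [b] else []) ++ (if pvWrap n b = xn then [a] else [])
  | _ => []

-- what one edge [a, b] contributes to the row OF RAW NAME x (consistent naming)
def pvContrib (x : Int) (e : List Int) : List Int :=
  match e with
  | [a, b] => (if a = x then [b] else []) ++ (if b = x then [a] else [])
  | _ => []

theorem pvBuild_char (es : List (List Int)) :
    ∀ g0 : List (List Int),
      (∀ e ∈ es, ∃ a b : Int, e = [a, b] ∧ pvWrap g0.length a < g0.length ∧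
          pvWrap g0.length b < g0.length) →
      (es.foldl (fun g e => match e with
        | [x, y] => pvAppend (pvAppend g x y) y x
        | _ => g) g0).length = g0.length ∧
      ∀ xn, xn < g0.length →
        (es.foldl (fun g e => match e with
          | [x, y] => pvAppend (pvAppend g x y) y x
          | _ => g) g0).getD xn []
        = g0.getD xn [] ++ es.flatMap (pvContribW g0.length xn) := by
  induction es with
  | nil => intro g0 _; exact ⟨rfl, fun xn _ => by simp⟩
  | cons e es ihe =>
    intro g0 hwf
    obtain ⟨a, b, rfl, ha, hb⟩ := hwf _ List.mem_cons_self
    have hlen : (pvAppend (pvAppend g0 a b) b a).length = g0.length := by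
      simp [pvAppend]
    have hlen1 : (pvAppend g0 a b).length = g0.length := by simp [pvAppend]
    have hget : ∀ xn, xn < g0.length →
        (pvAppend (pvAppend g0 a b) b a).getD xn []
          = g0.getD xn [] ++ pvContribW g0.length xn [a, b] := by
      intro xn hxn
      simp only [pvAppend, pvContribW, hlen1, List.getD_eq_getElem?_getD,
        List.getElem?_modify]
      by_cases hax : pvWrap g0.length a = xn <;> by_cases hbx : pvWrap g0.length b = xn <;>
        simp [hax, hbx, hxn]
    obtain ⟨ih1, ih2⟩ := ihe (pvAppend (pvAppend g0 a b) b a)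
      (by rw [hlen]; exact fun e' he' => hwf e' (List.mem_cons_of_mem _ he'))
    refine ⟨by rw [List.foldl_cons]; exact ih1.trans hlen, ?_⟩
    intro xn hxn
    rw [List.foldl_cons]
    show (es.foldl _ (pvAppend (pvAppend g0 a b) b a)).getD xn [] = _
    rw [ih2 xn (by rw [hlen]; exact hxn), hget xn hxn, List.flatMap_cons, List.append_assoc]
    rw [hlen]

-- closure step grows the set
theorem pvGrow_subset (edges : List (List Int)) :
    ∀ (es : List (List Int)) (T : Finset Int), T ⊆ es.foldl (fun T e =>
      match e with
      | [x, y] => if x ∈ T then insert y T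
                  else if y ∈ T then insert x T else T
      | _ => T) T := by
  intro es
  induction es with
  | nil => intro T; exact fun i hi => hi
  | cons e es ihe =>
    intro T
    rw [List.foldl_cons]
    refine Finset.Subset.trans ?_ (ihe _)
    rcases e with _ | ⟨x, e⟩
    · exact fun i hi => hi
    · rcases e with _ | ⟨y, e⟩
      · exact fun i hi => hi
      · rcases e with _ | ⟨z, e⟩
        · show T ⊆ (if x ∈ T then insert y T
            else if y ∈ T then insert x T else T)
          split
          · exact Finset.subset_insert _ _
          · split
            · exact Finset.subset_insert _ _
            · exact fun i hi => hi
        · exact fun i hi => hi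

theorem pvGrow_subset' (edges : List (List Int)) (T : Finset Int) : T ⊆ pvGrow edges T :=
  pvGrow_subset edges edges T

-- if an endpoint of a listed edge is in T, the other endpoint is in pvGrow T
theorem pvGrow_closes (edges : List (List Int)) :
    ∀ (es : List (List Int)) (T : Finset Int) (a b : Int), [a, b] ∈ es →
      (a ∈ T ∨ b ∈ T) →
      (a ∈ es.foldl (fun T e =>
        match e with
        | [x, y] => if x ∈ T then insert y T
                    else if y ∈ T then insert x T else T
        | _ => T) T
      ∧ b ∈ es.foldl (fun T e =>
        match e with
        | [x, y] => if x ∈ T then insert y T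
                    else if y ∈ T then insert x T else T
        | _ => T) T) := by
  intro es
  induction es with
  | nil => intro T a b hmem; exact absurd hmem (by simp)
  | cons e es ihe =>
    intro T a b hmem hT
    rcases List.mem_cons.mp hmem with rfl | htail
    · rw [List.foldl_cons]
      have hstep : a ∈ (if a ∈ T then insert b T
            else if b ∈ T then insert a T else T)
          ∧ b ∈ (if a ∈ T then insert b T
            else if b ∈ T then insert a T else T) := by
        rcases hT with hA | hB
        · rw [if_pos hA]
          exact ⟨Finset.mem_insert_of_mem hA, Finset.mem_insert_self _ _⟩
        · by_cases hA : a ∈ T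
          · rw [if_pos hA]
            exact ⟨Finset.mem_insert_of_mem hA, Finset.mem_insert_self _ _⟩
          · rw [if_neg hA, if_pos hB]
            exact ⟨Finset.mem_insert_self _ _, Finset.mem_insert_of_mem hB⟩
      exact ⟨pvGrow_subset edges es _ hstep.1, pvGrow_subset edges es _ hstep.2⟩
    · rw [List.foldl_cons]
      apply ihe _ a b htail
      have hsub := pvGrow_subset edges [e] T
      simp only [List.foldl_cons, List.foldl_nil] at hsub
      rcases hT with hA | hB
      · exact Or.inl (hsub hA)
      · exact Or.inr (hsub hB)

-- the iterated closure is a fixed point once enough steps are taken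
theorem pvCset_fixed (edges : List (List Int)) (m : Nat)
    (hbound : ∀ (j : Nat), ((pvGrow edges)^[j] {0} : Finset Int).card ≤ m) :
    pvGrow edges ((pvGrow edges)^[m] {0}) = (pvGrow edges)^[m] {0} := by
  have hmono : ∀ j : Nat, (pvGrow edges)^[j] {0} ⊆ (pvGrow edges)^[j + 1] {0} := by
    intro j
    rw [Function.iterate_succ_apply']
    exact pvGrow_subset' edges _
  have hstab : ∀ j : Nat, (pvGrow edges)^[j] {0} = (pvGrow edges)^[j + 1] {0} →
      ∀ l : Nat, j ≤ l → (pvGrow edges)^[l] {0} = (pvGrow edges)^[j] {0} := by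
    intro j hj l hl
    induction l with
    | zero => cases Nat.le_zero.mp hl; rfl
    | succ l ihl =>
      rcases Nat.lt_or_ge j (l + 1) with hlt | hge
      · have hlj := ihl (by omega)
        rw [Function.iterate_succ_apply', hlj, ← Function.iterate_succ_apply' (pvGrow edges) j,
          ← hj]
      · have hjl : j = l + 1 := by omega
        rw [hjl]
  have hex : ∃ j : Nat, j ≤ m ∧ (pvGrow edges)^[j] {0} = (pvGrow edges)^[j + 1] {0} := by
    by_contra hcon
    push Not at hcon
    have hstrict : ∀ j : Nat, j ≤ m → j + 1 ≤ ((pvGrow edges)^[j] {0} : Finset Int).card := by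
      intro j
      induction j with
      | zero => intro _; simp
      | succ j ihj =>
        intro hj
        have h1 := ihj (by omega)
        have hne := hcon j (by omega)
        have hss : (pvGrow edges)^[j] {0} ⊂ (pvGrow edges)^[j + 1] {0} :=
          Finset.ssubset_iff_subset_ne.mpr ⟨hmono j, hne⟩
        have := Finset.card_lt_card hss
        omega
    have := hstrict m (le_refl _)
    have := hbound m
    omega
  obtain ⟨j, hjm, hj⟩ := hex
  have h1 : (pvGrow edges)^[m] {0} = (pvGrow edges)^[j] {0} := hstab j hj m hjm
  have h2 : (pvGrow edges)^[m + 1] {0} = (pvGrow edges)^[j] {0} := hstab j hj (m + 1) (by omega)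
  rw [← Function.iterate_succ_apply' (pvGrow edges) m, h1, h2]

def pvSymC (C : Finset Int) (h0 : (0 : Int) ∈ C) (e : List Int) : Sym2 {v : Int // v ∈ C} :=
  s(if h : e.getD 0 0 ∈ C then ⟨e.getD 0 0, h⟩ else ⟨0, h0⟩,
    if h : e.getD 1 0 ∈ C then ⟨e.getD 1 0, h⟩ else ⟨0, h0⟩)

-- From Pre_ node 0's component is a tree: there is an acyclic graph on that component whose
-- adjacency is exactly the rows pvBuildG produced for its names, each row without duplicates.
theorem pvTree_facts (edges : List (List Int)) (nums : List Int) (k : Int)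
    (hpre : Pre_subtreeInversionSum edges nums k) :
    ∃ h0C : (0 : Int) ∈ pvCset edges,
      (∀ v ∈ pvCset edges, -(nums.length : Int) ≤ v ∧ v < (nums.length : Int)) ∧
      (∀ v ∈ pvCset edges, v ∈ pvUsed edges) ∧
      ∃ G : SimpleGraph {v : Int // v ∈ pvCset edges}, G.IsAcyclic ∧
        (∀ (xv : {v : Int // v ∈ pvCset edges}) (y : Int),
          y ∈ pvRow (pvBuildG edges nums.length) xv.val →
            (-(nums.length : Int) ≤ y ∧ y < (nums.length : Int)) ∧
            ∃ h : y ∈ pvCset edges, G.Adj xv ⟨y, h⟩) ∧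
        (∀ xv : {v : Int // v ∈ pvCset edges},
          (pvRow (pvBuildG edges nums.length) xv.val).Nodup) := by
  obtain ⟨hn', hk, hwf0, hinj, hcnt⟩ := hpre
  set n := nums.length with hnn
  have hwf : ∀ e ∈ edges, ∃ a b : Int, e = [a, b] ∧ -(n : Int) ≤ a ∧ a < (n : Int) ∧
      -(n : Int) ≤ b ∧ b < (n : Int) := by
    intro e he
    obtain ⟨hlen2, h1, h2, h3, h4⟩ := hwf0 e he
    obtain ⟨a, b, rfl⟩ := List.length_eq_two.mp hlen2
    exact ⟨a, b, rfl, h1, h2, h3, h4⟩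
  have hused : ∀ e ∈ edges, ∀ v ∈ e, v ∈ pvUsed edges := by
    intro e he v hv
    exact List.mem_cons_of_mem _ (List.mem_flatMap.mpr ⟨e, he, hv⟩)
  have h0used : (0 : Int) ∈ pvUsed edges := List.mem_cons_self
  -- adjacency rows
  obtain ⟨hglen, hgchar⟩ := pvBuild_char edges (List.replicate n [])
    (by
      intro e he
      obtain ⟨a, b, rfl, h1, h2, h3, h4⟩ := hwf e he
      rw [List.length_replicate]
      exact ⟨a, b, rfl, pvWrap_lt n a h1 h2, pvWrap_lt n b h3 h4⟩)
  rw [List.length_replicate] at hglen hgchar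
  have hgrow : ∀ x ∈ pvCset edges, -(n : Int) ≤ x → x < (n : Int) →
      pvRow (pvBuildG edges n) x = edges.flatMap (pvContrib x) := by
    intro x hxC hx1 hx2
    have hxn : pvWrap n x < n := pvWrap_lt n x hx1 hx2
    have hlenG : (pvBuildG edges n).length = n := hglen
    have hconv : edges.flatMap (pvContribW n (pvWrap n x)) = edges.flatMap (pvContrib x) := by
      apply List.flatMap_congr
      intro e he
      obtain ⟨a, b, rfl, ha1, ha2, hb1, hb2⟩ := hwf e he
      have haU := hused _ he a (by simp)
      have hbU := hused _ he b (by simp)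
      show ((if pvWrap n a = pvWrap n x then [b] else [])
            ++ (if pvWrap n b = pvWrap n x then [a] else []))
          = ((if a = x then [b] else []) ++ (if b = x then [a] else []))
      have hiffa : pvWrap n a = pvWrap n x ↔ a = x :=
        ⟨fun hc => hinj a haU x hxC hc, fun hc => by rw [hc]⟩
      have hiffb : pvWrap n b = pvWrap n x ↔ b = x :=
        ⟨fun hc => hinj b hbU x hxC hc, fun hc => by rw [hc]⟩
      by_cases hax : a = x
      · rw [if_pos (hiffa.mpr hax), if_pos hax]
        by_cases hbx : b = x
        · rw [if_pos (hiffb.mpr hbx), if_pos hbx]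
        · rw [if_neg (fun hc => hbx (hiffb.mp hc)), if_neg hbx]
      · rw [if_neg (fun hc => hax (hiffa.mp hc)), if_neg hax]
        by_cases hbx : b = x
        · rw [if_pos (hiffb.mpr hbx), if_pos hbx]
        · rw [if_neg (fun hc => hbx (hiffb.mp hc)), if_neg hbx]
    unfold pvRow
    rw [hlenG]
    rw [show ((pvBuildG edges n).getD (pvWrap n x) []
        = (List.replicate n []).getD (pvWrap n x) []
          ++ edges.flatMap (pvContribW n (pvWrap n x))) from hgchar (pvWrap n x) hxn]
    rw [hconv]
    simp
  set m := 2 * edges.length + 1 with hm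
  -- members of the closure are used names, in range
  have hCaux : ∀ (j : Nat), ∀ v ∈ (pvGrow edges)^[j] {0},
      v ∈ pvUsed edges ∧ -(n : Int) ≤ v ∧ v < (n : Int) := by
    intro j
    induction j with
    | zero =>
      intro v hv
      rw [Function.iterate_zero_apply, Finset.mem_singleton] at hv
      subst hv
      exact ⟨h0used, by omega, by exact_mod_cast hn'⟩
    | succ j ihj =>
      intro v hv
      rw [Function.iterate_succ_apply'] at hv
      have aux : ∀ (es : List (List Int)), (∀ e ∈ es, e ∈ edges) →
          ∀ (T : Finset Int), (∀ v ∈ T, v ∈ pvUsed edges ∧ -(n : Int) ≤ v ∧ v < (n : Int)) →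
          ∀ v ∈ es.foldl (fun T e =>
            match e with
            | [x, y] => if x ∈ T then insert y T
                        else if y ∈ T then insert x T else T
            | _ => T) T, v ∈ pvUsed edges ∧ -(n : Int) ≤ v ∧ v < (n : Int) := by
        intro es
        induction es with
        | nil => intro _ T hT v hv; exact hT v hv
        | cons e es ihe =>
          intro hes T hT
          obtain ⟨a, b, rfl, ha1, ha2, hb1, hb2⟩ := hwf e (hes e List.mem_cons_self)
          rw [List.foldl_cons]
          apply ihe (fun e' he' => hes e' (List.mem_cons_of_mem _ he'))
          show ∀ v ∈ (if a ∈ T then insert b T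
              else if b ∈ T then insert a T else T), _
          have hamem := hused _ (hes _ List.mem_cons_self) a (by simp)
          have hbmem := hused _ (hes _ List.mem_cons_self) b (by simp)
          split
          · intro v hv
            rcases Finset.mem_insert.mp hv with rfl | hv'
            · exact ⟨hbmem, hb1, hb2⟩
            · exact hT v hv'
          · split
            · intro v hv
              rcases Finset.mem_insert.mp hv with rfl | hv'
              · exact ⟨hamem, ha1, ha2⟩
              · exact hT v hv'
            · exact hT
      exact aux edges (fun e he => he) _ ihj v hv
  have hCn' : ∀ v ∈ pvCset edges, -(n : Int) ≤ v ∧ v < (n : Int) :=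
    fun v hv => (hCaux m v hv).2
  have hCU : ∀ v ∈ pvCset edges, v ∈ pvUsed edges :=
    fun v hv => (hCaux m v hv).1
  have h0C : (0 : Int) ∈ pvCset edges := by
    have hsub0 : ∀ l : Nat, ({0} : Finset Int) ⊆ (pvGrow edges)^[l] {0} := by
      intro l
      induction l with
      | zero => exact fun i hi => hi
      | succ l ihl =>
        rw [Function.iterate_succ_apply']
        exact Finset.Subset.trans ihl (pvGrow_subset' edges _)
    exact hsub0 m (Finset.mem_singleton_self 0)
  have hflatlen : (edges.flatMap (fun e => e)).length ≤ 2 * edges.length := by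
    have : ∀ es : List (List Int), (∀ e ∈ es, e ∈ edges) →
        (es.flatMap (fun e => e)).length ≤ 2 * es.length := by
      intro es
      induction es with
      | nil => intro _; simp
      | cons e es ihe =>
        intro hes
        obtain ⟨a, b, rfl, _⟩ := hwf e (hes e List.mem_cons_self)
        rw [List.flatMap_cons, List.length_append]
        have := ihe (fun e' he' => hes e' (List.mem_cons_of_mem _ he'))
        simp only [List.length_cons, List.length_nil]
        omega
    exact this edges (fun e he => he)
  have hfix : pvGrow edges (pvCset edges) = pvCset edges := by
    apply pvCset_fixed
    intro j
    have hsubU : (pvGrow edges)^[j] {0} ⊆ (pvUsed edges).toFinset := by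
      intro v hv
      exact List.mem_toFinset.mpr (hCaux j v hv).1
    calc ((pvGrow edges)^[j] {0} : Finset Int).card
        ≤ (pvUsed edges).toFinset.card := Finset.card_le_card hsubU
      _ ≤ (pvUsed edges).length := List.toFinset_card_le _
      _ ≤ m := by
          unfold pvUsed
          rw [List.length_cons]
          omega
  -- the closure is closed under listed edges
  have hclosed : ∀ e ∈ edges, ∀ (a b : Int), e = [a, b] →
      (a ∈ pvCset edges ∨ b ∈ pvCset edges) →
      a ∈ pvCset edges ∧ b ∈ pvCset edges := by
    intro e he a b heq hor
    have := pvGrow_closes edges edges (pvCset edges) a b (heq ▸ he) hor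
    rw [show edges.foldl _ (pvCset edges) = pvGrow edges (pvCset edges) from rfl,
      hfix] at this
    exact this
  set C := pvCset edges with hCdef
  set eC : List (List Int) :=
    edges.filter (fun e => e.getD 0 0 ∈ C) with heC
  have heCmem : ∀ e ∈ eC, e ∈ edges := fun e he => (List.mem_filter.mp he).1
  set G : SimpleGraph {v : Int // v ∈ C} :=
    SimpleGraph.fromRel (fun u v => ∃ e ∈ edges, e = [u.val, v.val]) with hG
  -- adjacency from a well-formed edge with distinct endpoints
  have hadj_of_edge : ∀ e ∈ edges, ∀ (a b : Int), e = [a, b] → a ≠ b →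
      ∀ (ha : a ∈ C) (hb : b ∈ C), G.Adj ⟨a, ha⟩ ⟨b, hb⟩ := by
    intro e he a b rfl hab ha hb
    exact ⟨fun hc => hab (congrArg Subtype.val hc), Or.inl ⟨_, he, rfl⟩⟩
  -- connectivity of the component graph
  have hreach : ∀ (j : Nat) (v : Int), v ∈ (pvGrow edges)^[j] {0} →
      ∃ h : v ∈ C, G.Reachable ⟨0, h0C⟩ ⟨v, h⟩ := by
    intro j
    induction j with
    | zero =>
      intro v hv
      rw [Function.iterate_zero_apply, Finset.mem_singleton] at hv
      subst hv
      exact ⟨h0C, SimpleGraph.Reachable.refl _⟩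
    | succ j ihj =>
      intro v hv
      rw [Function.iterate_succ_apply'] at hv
      have aux : ∀ (es : List (List Int)), (∀ e ∈ es, e ∈ edges) →
          ∀ (T : Finset Int), (∀ v ∈ T, ∃ h : v ∈ C, G.Reachable ⟨0, h0C⟩ ⟨v, h⟩) →
          ∀ v ∈ es.foldl (fun T e =>
            match e with
            | [x, y] => if x ∈ T then insert y T
                        else if y ∈ T then insert x T else T
            | _ => T) T, ∃ h : v ∈ C, G.Reachable ⟨0, h0C⟩ ⟨v, h⟩ := by
        intro es
        induction es with
        | nil => intro _ T hT v hv; exact hT v hv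
        | cons e es ihe =>
          intro hes T hT
          obtain ⟨a, b, rfl, ha1, ha2, hb1, hb2⟩ := hwf e (hes e List.mem_cons_self)
          rw [List.foldl_cons]
          apply ihe (fun e' he' => hes e' (List.mem_cons_of_mem _ he'))
          show ∀ v ∈ (if a ∈ T then insert b T
              else if b ∈ T then insert a T else T), _
          by_cases hA : a ∈ T
          · rw [if_pos hA]
            intro v hv
            rcases Finset.mem_insert.mp hv with rfl | hv'
            · by_cases hab : a = v
              · exact hT _ (hab ▸ hA)
              · obtain ⟨hc, hr⟩ := hT _ hA
                have hbC : v ∈ C :=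
                  (hclosed _ (hes _ List.mem_cons_self) a v rfl (Or.inl hc)).2
                refine ⟨hbC, hr.trans (SimpleGraph.Adj.reachable ?_)⟩
                exact hadj_of_edge _ (hes _ List.mem_cons_self) a v rfl hab _ _
            · exact hT v hv'
          · rw [if_neg hA]
            by_cases hB : b ∈ T
            · rw [if_pos hB]
              intro v hv
              rcases Finset.mem_insert.mp hv with rfl | hv'
              · by_cases hab : v = b
                · rw [hab] at *; exact hT _ hB
                · obtain ⟨hc, hr⟩ := hT _ hB
                  have haC : v ∈ C :=
                    (hclosed _ (hes _ List.mem_cons_self) v b rfl (Or.inr hc)).1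
                  refine ⟨haC, hr.trans (SimpleGraph.Adj.reachable ?_)⟩
                  exact (hadj_of_edge _ (hes _ List.mem_cons_self) v b rfl hab _ _).symm
              · exact hT v hv'
            · rw [if_neg hB]; exact hT
      exact aux edges (fun e he => he) _ (fun v hv => ihj v hv) v hv
  have hconn : G.Connected := by
    have hprec : G.Preconnected := by
      intro u v
      obtain ⟨hu1, hu2⟩ := hreach m u.val u.2
      obtain ⟨hv1, hv2⟩ := hreach m v.val v.2
      rw [Subtype.coe_eta] at hu2 hv2
      exact hu2.symm.trans hv2
    have : Nonempty {v : Int // v ∈ C} := ⟨⟨0, h0C⟩⟩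
    exact ⟨hprec⟩
  -- counting
  have hsymwf : ∀ (a b : Int),
      ∀ (ha : a ∈ C) (hb : b ∈ C),
        pvSymC C h0C [a, b] = s((⟨a, ha⟩ : {v : Int // v ∈ C}), ⟨b, hb⟩) := by
    intro a b ha hb
    unfold pvSymC
    congr 1
    · rw [dif_pos (show (([a, b] : List Int).getD 0 0 ∈ C) from ha)]
      rfl
    · rw [dif_pos (show (([a, b] : List Int).getD 1 0 ∈ C) from hb)]
      rfl
  have hCboth : ∀ e ∈ eC, ∀ (a b : Int), e = [a, b] → a ∈ C ∧ b ∈ C := by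
    intro e he a b heq
    have h1 := (List.mem_filter.mp he).2
    subst heq
    simp only [List.getD_cons_zero, decide_eq_true_eq] at h1
    exact hclosed _ (heCmem _ he) a b rfl (Or.inl h1)
  have hsub : G.edgeSet ⊆ ((eC.map (pvSymC C h0C)).toFinset : Finset (Sym2 {v : Int // v ∈ C})) := by
    intro s hs
    induction s with
    | _ u v =>
      rw [SimpleGraph.mem_edgeSet] at hs
      obtain ⟨hne, hrel⟩ := hs
      simp only [Finset.mem_coe, List.mem_toFinset, List.mem_map]
      rcases hrel with ⟨e, he, heq⟩ | ⟨e, he, heq⟩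
      · refine ⟨e, ?_, ?_⟩
        · rw [heC, List.mem_filter]
          refine ⟨he, ?_⟩
          rw [heq]
          simp only [List.getD_cons_zero, decide_eq_true_eq]
          exact u.2
        · subst heq
          rw [hsymwf _ _ u.2 v.2]
      · refine ⟨e, ?_, ?_⟩
        · rw [heC, List.mem_filter]
          refine ⟨he, ?_⟩
          rw [heq]
          simp only [List.getD_cons_zero, decide_eq_true_eq]
          exact v.2
        · subst heq
          rw [hsymwf _ _ v.2 u.2, Sym2.eq_swap]
  have hle1 : Nat.card G.edgeSet ≤ (eC.map (pvSymC C h0C)).toFinset.card := by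
    have h := Nat.card_mono (Finset.finite_toSet _) hsub
    exact h.trans (Nat.card_eq_finsetCard _).le
  have hge : C.card ≤ Nat.card G.edgeSet + 1 := by
    have := hconn.card_vert_le_card_edgeSet_add_one
    rwa [Nat.card_eq_fintype_card, Fintype.card_coe] at this
  have hle2 : (eC.map (pvSymC C h0C)).toFinset.card ≤ eC.length := by
    have := List.toFinset_card_le (eC.map (pvSymC C h0C))
    rwa [List.length_map] at this
  have hcnt' : eC.length + 1 = C.card := hcnt
  have hcard1 : (eC.map (pvSymC C h0C)).toFinset.card = eC.length := by omega
  have hcard2 : Nat.card G.edgeSet = eC.length := by omega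
  have hnodupf : (eC.map (pvSymC C h0C)).Nodup := by
    have hdl : (eC.map (pvSymC C h0C)).dedup.length = (eC.map (pvSymC C h0C)).length := by
      rw [← List.card_toFinset, hcard1, List.length_map]
    have := (List.dedup_sublist (eC.map (pvSymC C h0C))).eq_of_length hdl
    rw [← this]
    exact List.nodup_dedup _
  have hedge_in : ∀ e ∈ eC, pvSymC C h0C e ∈ G.edgeSet := by
    by_contra hcon
    push Not at hcon
    obtain ⟨e0, he0, hne0⟩ := hcon
    have hsub2 : G.edgeSet ⊆
        (((eC.filter (fun e => pvSymC C h0C e ≠ pvSymC C h0C e0)).map (pvSymC C h0C)).toFinset :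
          Finset (Sym2 {v : Int // v ∈ C})) := by
      intro s hs
      have := hsub hs
      simp only [Finset.mem_coe, List.mem_toFinset, List.mem_map] at this ⊢
      obtain ⟨e, he, rfl⟩ := this
      refine ⟨e, List.mem_filter.mpr ⟨he, ?_⟩, rfl⟩
      simp only [decide_eq_true_eq]
      intro hc
      exact hne0 (hc ▸ hs)
    have hlt : ((eC.filter (fun e => pvSymC C h0C e ≠ pvSymC C h0C e0)).map
        (pvSymC C h0C)).toFinset.card < eC.length := by
      calc _ ≤ ((eC.filter (fun e => pvSymC C h0C e ≠ pvSymC C h0C e0)).map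
            (pvSymC C h0C)).length := List.toFinset_card_le _
        _ = (eC.filter (fun e => pvSymC C h0C e ≠ pvSymC C h0C e0)).length := List.length_map ..
        _ < eC.length := by
            rw [List.length_filter_lt_length_iff_exists]
            exact ⟨e0, he0, by simp⟩
    have h := (Nat.card_mono (Finset.finite_toSet _) hsub2).trans
      (Nat.card_eq_finsetCard _).le
    rw [hcard2] at h
    omega
  have hnondiag : ∀ e ∈ eC, ∀ (a b : Int), e = [a, b] → a ≠ b := by
    intro e he a b heq hab
    subst heq
    obtain ⟨haC, hbC⟩ := hCboth _ he a b rfl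
    have hmem := hedge_in _ he
    apply G.not_isDiag_of_mem_edgeSet hmem
    subst hab
    rw [hsymwf _ _ haC hbC]
    simp
  -- rows of component names come from component edges only
  have hrowC : ∀ xv : {v : Int // v ∈ C},
      pvRow (pvBuildG edges n) xv.val = eC.flatMap (pvContrib xv.val) := by
    intro xv
    obtain ⟨hx1, hx2⟩ := hCn' _ xv.2
    rw [hgrow xv.val xv.2 hx1 hx2]
    have : ∀ (es : List (List Int)), (∀ e ∈ es, e ∈ edges) →
        es.flatMap (pvContrib xv.val)
          = (es.filter (fun e => e.getD 0 0 ∈ C)).flatMap (pvContrib xv.val) := by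
      intro es
      induction es with
      | nil => intro _; rfl
      | cons e es ihe =>
        intro hes
        obtain ⟨a, b, rfl, ha1, ha2, hb1, hb2⟩ := hwf e (hes e List.mem_cons_self)
        rw [List.flatMap_cons]
        by_cases hP : ([a, b] : List Int).getD 0 0 ∈ C
        · rw [List.filter_cons_of_pos (by simpa using hP), List.flatMap_cons,
            ihe (fun e' he' => hes e' (List.mem_cons_of_mem _ he'))]
        · have hc : pvContrib xv.val [a, b] = [] := by
            unfold pvContrib
            have hax : a ≠ xv.val := by
              intro hc
              exact hP (by simpa using (hc ▸ xv.2))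
            have hbx : b ≠ xv.val := by
              intro hc
              have hbC : b ∈ C := hc ▸ xv.2
              have := (hclosed _ (hes _ List.mem_cons_self) a b rfl (Or.inr hbC)).1
              exact hP (by simpa using this)
            simp [hax, hbx]
          rw [hc, List.filter_cons_of_neg (by simpa using hP),
            ihe (fun e' he' => hes e' (List.mem_cons_of_mem _ he')), List.nil_append]
    rw [this edges (fun e he => he)]
  -- contribution determines the Sym2 of the edge
  have hcontrib_sym : ∀ (xv : {v : Int // v ∈ C}), ∀ e ∈ eC, ∀ y ∈ pvContrib xv.val e,
      (-(n : Int) ≤ y ∧ y < (n : Int)) ∧ ∃ hyC : y ∈ C,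
        pvSymC C h0C e = s(xv, (⟨y, hyC⟩ : {v : Int // v ∈ C})) := by
    intro xv e he y hy
    obtain ⟨a, b, rfl, ha1, ha2, hb1, hb2⟩ := hwf e (heCmem _ he)
    obtain ⟨haC, hbC⟩ := hCboth _ he a b rfl
    unfold pvContrib at hy
    rw [List.mem_append] at hy
    have hsym := hsymwf a b haC hbC
    rcases hy with hy | hy
    · by_cases hax : a = xv.val
      · rw [if_pos hax] at hy
        rcases List.mem_singleton.mp hy with rfl
        refine ⟨⟨hb1, hb2⟩, hbC, ?_⟩
        rw [hsym]
        congr 1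
        exact Subtype.ext hax
      · rw [if_neg hax] at hy
        exact absurd hy (by simp)
    · by_cases hbx : b = xv.val
      · rw [if_pos hbx] at hy
        rcases List.mem_singleton.mp hy with rfl
        refine ⟨⟨ha1, ha2⟩, haC, ?_⟩
        rw [hsym, Sym2.eq_swap]
        congr 1
        exact Subtype.ext hbx
      · rw [if_neg hbx] at hy
        exact absurd hy (by simp)
  refine ⟨h0C, hCn', hCU, G, ?_, ?_, ?_⟩
  · -- acyclic, via the tree characterisation
    have htree : G.IsTree := by
      rw [SimpleGraph.isTree_iff_connected_and_card]
      refine ⟨hconn, ?_⟩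
      rw [hcard2, Nat.card_eq_fintype_card, Fintype.card_coe]
      omega
    exact htree.isAcyclic
  · -- each row element is a real adjacency
    intro xv y hy
    rw [hrowC xv] at hy
    obtain ⟨e, he, hye⟩ := List.mem_flatMap.mp hy
    obtain ⟨hyb, hyC, hsym⟩ := hcontrib_sym xv e he y hye
    refine ⟨hyb, hyC, ?_⟩
    have := hedge_in e he
    rw [hsym] at this
    rwa [SimpleGraph.mem_edgeSet] at this
  · -- each row has no duplicates
    intro xv
    rw [hrowC xv, List.nodup_flatMap]
    constructor
    · intro e he
      obtain ⟨a, b, rfl, ha1, ha2, hb1, hb2⟩ := hwf e (heCmem _ he)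
      have hab : a ≠ b := hnondiag _ he a b rfl
      unfold pvContrib
      by_cases hax : a = xv.val <;> by_cases hbx : b = xv.val
      · exact absurd (hax.trans hbx.symm) hab
      all_goals simp [hax, hbx]
    · have hpw : List.Pairwise (fun e e' => pvSymC C h0C e ≠ pvSymC C h0C e') eC := by
        have := hnodupf
        rw [List.Nodup, List.pairwise_map] at this
        exact this
      refine List.Pairwise.imp_of_mem ?_ hpw
      intro e e' he he' hne y hy hy'
      obtain ⟨_, hyC, hs⟩ := hcontrib_sym xv e he y hy
      obtain ⟨_, hyC', hs'⟩ := hcontrib_sym xv e' he' y hy'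
      exact hne (hs.trans hs'.symm)

-- the master induction: along an acyclic graph, the DFS from the end of any path is good,
-- visits pairwise distinct rows, and stays on path-extending branches
theorem pvDfs_master (g : List (List Int)) (n : Nat) (C : Finset Int) (h0C : (0 : Int) ∈ C)
    (hCn : ∀ v ∈ C, -(n : Int) ≤ v ∧ v < (n : Int))
    (hinj : ∀ u ∈ C, ∀ v ∈ C, pvWrap n u = pvWrap n v → u = v)
    (G : SimpleGraph {v : Int // v ∈ C})
    (hacyc : G.IsAcyclic)
    (hadj : ∀ (xv : {v : Int // v ∈ C}) (y : Int), y ∈ pvRow g xv.val →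
      (-(n : Int) ≤ y ∧ y < (n : Int)) ∧ ∃ h : y ∈ C, G.Adj xv ⟨y, h⟩)
    (hnd : ∀ xv : {v : Int // v ∈ C}, (pvRow g xv.val).Nodup) :
    ∀ (m : Nat) (S : Finset Int) (x : {v : Int // v ∈ C}) (fa : Int) (P : G.Walk ⟨0, h0C⟩ x),
      S.card ≤ m → P.IsPath →
      (P.length = 0 ∧ fa = -1 ∨ 0 < P.length ∧ fa = P.penultimate.val) →
      S = (C \ (P.support.map Subtype.val).toFinset) ∪ {x.val} →
      pvGood g n S x.val fa ∧ (pvSpan g n S x.val fa).Nodup ∧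
      (∀ zn ∈ pvSpan g n S x.val fa,
        ∃ (z : {v : Int // v ∈ C}) (q : G.Walk x z), zn = pvWrap n z.val ∧ (P.append q).IsPath) := by
  intro m
  induction m with
  | zero =>
    intro S x fa P hcard _ _ hS
    exfalso
    have hxmem : x.val ∈ S := hS ▸ Finset.mem_union_right _ (Finset.mem_singleton_self _)
    have := Finset.card_pos.mpr ⟨_, hxmem⟩
    omega
  | succ m ihm =>
    intro S x fa P hcard hP hcode hS
    have hxmem : x.val ∈ S := hS ▸ Finset.mem_union_right _ (Finset.mem_singleton_self _)
    have hxsup : x.val ∈ P.support.map Subtype.val :=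
      List.mem_map.mpr ⟨x, P.end_mem_support, rfl⟩
    -- per-child data
    have hrec : ∀ y ∈ pvChl g x.val fa,
        ∃ (hyC : y ∈ C),
          G.Adj x ⟨y, hyC⟩ ∧ (⟨y, hyC⟩ : {v : Int // v ∈ C}) ∉ P.support ∧
          pvGood g n (S.erase x.val) y x.val ∧
          (pvSpan g n (S.erase x.val) y x.val).Nodup ∧
          (∀ zn ∈ pvSpan g n (S.erase x.val) y x.val,
            ∃ (z : {v : Int // v ∈ C}) (q : G.Walk x z), zn = pvWrap n z.val ∧
              (P.append q).IsPath ∧ 0 < q.length ∧ q.getVert 1 = ⟨y, hyC⟩) := by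
      intro y hy
      have hyrow : y ∈ pvRow g x.val := (List.mem_filter.mp hy).1
      have hyne : y ≠ fa := by
        have := (List.mem_filter.mp hy).2
        simpa using this
      obtain ⟨hyb, hyC, hadjy⟩ := hadj x y hyrow
      have hnotin : (⟨y, hyC⟩ : {v : Int // v ∈ C}) ∉ P.support := by
        intro hin
        have heq := hacyc.path_concat (hP.takeUntil hin) hP hadjy.symm hin
        rcases hcode with ⟨hl0, _⟩ | ⟨_, hfa⟩
        · rw [heq, SimpleGraph.Walk.length_concat] at hl0
          omega
        · apply hyne
          rw [hfa, heq, SimpleGraph.Walk.penultimate_concat]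
      -- recurse along the extended path
      have hP' := hP.concat hnotin hadjy
      have hcode' : ((P.concat hadjy).length = 0 ∧ x.val = -1 ∨
          0 < (P.concat hadjy).length ∧
            x.val = (P.concat hadjy).penultimate.val) := by
        right
        constructor
        · rw [SimpleGraph.Walk.length_concat]; omega
        · rw [SimpleGraph.Walk.penultimate_concat]
      have hSerase : S.erase x.val
          = (C \ (((P.concat hadjy).support.map Subtype.val).toFinset))
              ∪ {(⟨y, hyC⟩ : {v : Int // v ∈ C}).val} := by
        have hynot : y ∉ P.support.map Subtype.val := by
          intro hc
          obtain ⟨u, hu, huv⟩ := List.mem_map.mp hc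
          exact hnotin (by rwa [show (⟨y, hyC⟩ : {v : Int // v ∈ C}) = u from Subtype.ext huv.symm])
        have h1 : S.erase x.val = C \ (P.support.map Subtype.val).toFinset := by
          rw [hS, Finset.erase_union_distrib, Finset.erase_singleton, Finset.union_empty,
            Finset.erase_eq_self.mpr]
          intro hc
          exact (Finset.mem_sdiff.mp hc).2 (List.mem_toFinset.mpr hxsup)
        rw [h1]
        have hsupp : (P.concat hadjy).support.map Subtype.val
            = P.support.map Subtype.val ++ [y] := by
          rw [SimpleGraph.Walk.support_concat, List.concat_eq_append, List.map_append]
          rfl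
        ext i
        rw [hsupp]
        constructor
        · intro hi
          obtain ⟨hilt, hnin⟩ := Finset.mem_sdiff.mp hi
          rw [List.mem_toFinset] at hnin
          by_cases hiy : i = y
          · exact Finset.mem_union_right _ (Finset.mem_singleton.mpr hiy)
          · refine Finset.mem_union_left _ (Finset.mem_sdiff.mpr ⟨hilt, ?_⟩)
            rw [List.mem_toFinset, List.mem_append, List.mem_singleton]
            rintro (hc | hc)
            · exact hnin hc
            · exact hiy hc
        · intro hi
          rcases Finset.mem_union.mp hi with hi | hi
          · obtain ⟨hilt, hnin⟩ := Finset.mem_sdiff.mp hi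
            rw [List.mem_toFinset, List.mem_append] at hnin
            exact Finset.mem_sdiff.mpr ⟨hilt, fun hc =>
              hnin (Or.inl (List.mem_toFinset.mp hc))⟩
          · rw [Finset.mem_singleton] at hi
            have hval : (⟨y, hyC⟩ : {v : Int // v ∈ C}).val = y := rfl
            rw [hval] at hi
            subst hi
            exact Finset.mem_sdiff.mpr ⟨hyC, fun hc =>
              hynot (List.mem_toFinset.mp hc)⟩
      have hcard' : (S.erase x.val).card ≤ m := by
        rw [Finset.card_erase_of_mem hxmem]
        omega
      obtain ⟨hgood', hnodup', hchar'⟩ := ihm (S.erase x.val) ⟨y, hyC⟩ x.val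
        (P.concat hadjy) hcard' hP' hcode' hSerase
      refine ⟨hyC, hadjy, hnotin, hgood', hnodup', ?_⟩
      intro zn hzn
      obtain ⟨z, q', hz, hq'⟩ := hchar' zn hzn
      refine ⟨z, SimpleGraph.Walk.cons hadjy q', hz, ?_, ?_, ?_⟩
      · rwa [← SimpleGraph.Walk.concat_append]
      · simp [SimpleGraph.Walk.length_cons]
      · rw [SimpleGraph.Walk.getVert_cons _ _ one_ne_zero]
        simp [SimpleGraph.Walk.getVert_zero]
    -- ordering facts
    have hgood : pvGood g n S x.val fa := by
      obtain ⟨hx1, hx2⟩ := hCn _ x.2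
      refine pvGood.mk (pvWrap_lt n x.val hx1 hx2) hxmem ?_
      intro y hy
      obtain ⟨_, _, _, hgood', _, _⟩ := hrec y hy
      exact hgood'
    have hspan : pvSpan g n S x.val fa
        = pvWrap n x.val :: ((pvChl g x.val fa).reverse.flatMap
            (fun y => pvSpan g n (S.erase x.val) y x.val)) := by
      rw [pvSpan, pvOrd_unfold hgood, List.map_cons, List.map_flatMap]
      rfl
    have hchlnd : (pvChl g x.val fa).Nodup := by
      exact (hnd x).filter _
    -- distinct children have disjoint spans
    have hdisj : ∀ y1 ∈ pvChl g x.val fa, ∀ y2 ∈ pvChl g x.val fa, y1 ≠ y2 →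
        ∀ zn, zn ∈ pvSpan g n (S.erase x.val) y1 x.val →
          zn ∈ pvSpan g n (S.erase x.val) y2 x.val → False := by
      intro y1 hy1 y2 hy2 hne zn hz1 hz2
      obtain ⟨hyC1, _, _, _, _, hchar1⟩ := hrec y1 hy1
      obtain ⟨hyC2, _, _, _, _, hchar2⟩ := hrec y2 hy2
      obtain ⟨z1, q1, hzv1, hpath1, hpos1, hfirst1⟩ := hchar1 zn hz1
      obtain ⟨z2, q2, hzv2, hpath2, hpos2, hfirst2⟩ := hchar2 zn hz2
      have hz12 : z1 = z2 :=
        Subtype.ext (hinj z1.val z1.2 z2.val z2.2 (hzv1 ▸ hzv2 ▸ rfl))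
      subst hz12
      have hequ := hacyc.path_unique ⟨P.append q1, hpath1⟩ ⟨P.append q2, hpath2⟩
      have hwalks : P.append q1 = P.append q2 := congrArg Subtype.val hequ
      have hv1 : (P.append q1).getVert (P.length + 1) = q1.getVert 1 := by
        rw [SimpleGraph.Walk.getVert_append]
        simp
      have hv2 : (P.append q2).getVert (P.length + 1) = q2.getVert 1 := by
        rw [SimpleGraph.Walk.getVert_append]
        simp
      have : (⟨y1, hyC1⟩ : {v : Int // v ∈ C}) = (⟨y2, hyC2⟩ : {v : Int // v ∈ C}) := by
        rw [← hfirst1, ← hfirst2, ← hv1, ← hv2, hwalks]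
      exact hne (congrArg Subtype.val this)
    -- x is in no child span
    have hxnot : ∀ y ∈ pvChl g x.val fa,
        pvWrap n x.val ∉ pvSpan g n (S.erase x.val) y x.val := by
      intro y hy hc
      obtain ⟨_, _, _, _, _, hchar'⟩ := hrec y hy
      obtain ⟨z, q, hzv, hpath, hpos, _⟩ := hchar' _ hc
      have hzx : z = x := Subtype.ext (hinj z.val z.2 x.val x.2 hzv.symm)
      subst hzx
      have hequ := hacyc.path_unique ⟨P.append q, hpath⟩ ⟨P, hP⟩
      have hwalks : P.append q = P := congrArg Subtype.val hequ
      have := congrArg SimpleGraph.Walk.length hwalks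
      rw [SimpleGraph.Walk.length_append] at this
      omega
    refine ⟨hgood, ?_, ?_⟩
    · -- Nodup of the span
      rw [hspan, List.nodup_cons]
      constructor
      · intro hc
        obtain ⟨y, hy, hyc⟩ := List.mem_flatMap.mp hc
        exact hxnot y (List.mem_reverse.mp hy) hyc
      · rw [List.nodup_flatMap]
        constructor
        · intro y hy
          obtain ⟨_, _, _, _, hnodup', _⟩ := hrec y (List.mem_reverse.mp hy)
          exact hnodup'
        · refine List.Pairwise.imp_of_mem ?_ (hchlnd.reverse.imp (fun h => h))
          intro y1 y2 hy1 hy2 hne zn hz1 hz2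
          exact hdisj y1 (List.mem_reverse.mp hy1) y2 (List.mem_reverse.mp hy2)
            (Ne.symm hne) zn hz1 hz2
    · -- span characterisation
      intro zn hzn
      rw [hspan] at hzn
      rcases List.mem_cons.mp hzn with rfl | hzn'
      · exact ⟨x, SimpleGraph.Walk.nil, rfl, by rwa [SimpleGraph.Walk.append_nil]⟩
      · obtain ⟨y, hy, hyz⟩ := List.mem_flatMap.mp hzn'
        obtain ⟨_, _, _, _, _, hchar'⟩ := hrec y (List.mem_reverse.mp hy)
        obtain ⟨z, q, hzv, hpath, _, _⟩ := hchar' zn hyz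
        exact ⟨z, q, hzv, hpath⟩

theorem pre_good (edges : List (List Int)) (nums : List Int) (k : Int)
    (hpre : Pre_subtreeInversionSum edges nums k) :
    pvGood (pvBuildG edges nums.length) nums.length (pvCset edges) 0 (-1) ∧
    (pvSpan (pvBuildG edges nums.length) nums.length (pvCset edges) 0 (-1)).Nodup ∧
    (∀ i ∈ pvSpan (pvBuildG edges nums.length) nums.length (pvCset edges) 0 (-1),
      i < nums.length) ∧
    (pvCset edges).card ≤ nums.length := by
  obtain ⟨h0C, hCn, hCU, G, hacyc, hadjrow, hndrow⟩ := pvTree_facts edges nums k hpre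
  have hinjC : ∀ u ∈ pvCset edges, ∀ v ∈ pvCset edges,
      pvWrap nums.length u = pvWrap nums.length v → u = v :=
    fun u hu v hv hc => hpre.2.2.2.1 u (hCU u hu) v hv hc
  have hS0 : pvCset edges
      = (pvCset edges \
          (((SimpleGraph.Walk.nil : G.Walk ⟨0, h0C⟩ ⟨0, h0C⟩).support.map Subtype.val).toFinset))
        ∪ {(⟨0, h0C⟩ : {v : Int // v ∈ pvCset edges}).val} := by
    ext i
    simp only [SimpleGraph.Walk.support_nil, List.map_cons, List.map_nil, Finset.mem_union,
      Finset.mem_sdiff, List.mem_toFinset, List.mem_singleton, Finset.mem_singleton]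
    constructor
    · intro hi
      by_cases h0 : i = (⟨0, h0C⟩ : {v : Int // v ∈ pvCset edges}).val
      · right; exact h0
      · left; exact ⟨hi, fun hc => h0 (by simpa using hc)⟩
    · rintro (⟨hi, _⟩ | h0)
      · exact hi
      · rw [h0]; exact h0C
  have hcard : (pvCset edges).card ≤ nums.length := by
    calc (pvCset edges).card ≤ (Finset.range nums.length).card := by
          apply Finset.card_le_card_of_injOn (pvWrap nums.length)
          · intro v hv
            obtain ⟨h1, h2⟩ := hCn v hv
            exact Finset.mem_range.mpr (pvWrap_lt nums.length v h1 h2)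
          · intro u hu v hv hc
            exact hinjC u hu v hv hc
      _ = nums.length := Finset.card_range _
  obtain ⟨hgood, hnodup, hchar⟩ := pvDfs_master (pvBuildG edges nums.length) nums.length
    (pvCset edges) h0C hCn hinjC G hacyc hadjrow hndrow
    (pvCset edges).card (pvCset edges) ⟨0, h0C⟩ (-1)
    SimpleGraph.Walk.nil (le_refl _) SimpleGraph.Walk.IsPath.nil
    (Or.inl ⟨rfl, rfl⟩) hS0
  refine ⟨hgood, hnodup, ?_, hcard⟩
  intro i hi
  obtain ⟨z, q, rfl, _⟩ := hchar i hi
  obtain ⟨h1, h2⟩ := hCn _ z.2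
  exact pvWrap_lt nums.length z.val h1 h2

theorem subtreeInversionSum_spec : Claim_equal_subtreeInversionSum := by
  intro edges nums k _ hpre
  unfold Spec_subtreeInversionSum subtreeInversionSum subtreeInversionSum_alt
  rw [bAdj_eq]
  have hstepf : bStep (pvBuildG edges nums.length) nums k
      = pvStep (pvBuildG edges nums.length) nums k :=
    funext fun dp => funext fun e => bStep_eq _ _ _ _ _
  simp only [hstepf]
  obtain ⟨hgood, hnodup, hlt, hcard⟩ := pre_good edges nums k hpre
  have hlen : (pvOrd (pvBuildG edges nums.length) (pvCset edges) 0 (-1)).length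
      ≤ nums.length := by
    have h1 : (pvSpan (pvBuildG edges nums.length) nums.length (pvCset edges) 0 (-1)).toFinset
        ⊆ Finset.range nums.length := by
      intro i hi
      simp only [List.mem_toFinset] at hi
      exact Finset.mem_range.mpr (hlt i hi)
    have h2 := Finset.card_le_card h1
    rw [List.toFinset_card_of_nodup hnodup, Finset.card_range] at h2
    simpa [pvSpan] using h2
  have hwalk : bWalk (pvBuildG edges nums.length) nums.length [(0, -1)] []
      = pvOrd (pvBuildG edges nums.length) (pvCset edges) 0 (-1) := by
    have := bWalk_ord (pvBuildG edges nums.length) nums.length hgood [] []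
      (nums.length - (pvOrd (pvBuildG edges nums.length) (pvCset edges) 0 (-1)).length)
    rw [Nat.add_sub_cancel' hlen] at this
    rw [this, bWalk_nilstack, List.nil_append]
  obtain ⟨-, -, hval⟩ := pvFold_ord (pvBuildG edges nums.length) nums k nums.length hgood
    hcard hnodup (List.replicate nums.length none)
    (List.length_replicate)
  have hmem : ((0 : Int), (-1 : Int)) ∈ pvOrd (pvBuildG edges nums.length)
      (pvCset edges) 0 (-1) := by
    rw [pvOrd_unfold hgood]; exact List.mem_cons_self
  have := hval _ hmem
  have h00 : pvWrap nums.length 0 = 0 := by simp [pvWrap]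
  rw [h00] at this
  simp only [hwalk] at this ⊢
  rw [this]
  rfl
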